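-- pv_equiv track=rewrite | github.com/sebastianaltomare/advent-of-code | y2024/day09/trying.py | find_leftmost_space
-- ===== SOURCE A (Python) =====
-- def find_leftmost_space(blocks, size_needed):
--     # Find the leftmost span of contiguous free space that can fit the file
--     current_span = 0
--     start_of_span = 0
--
--     for i, block in enumerate(blocks):
--         if block == '.':
--             if current_span == 0:
--                 start_of_span = i
--             current_span += 1
--             if current_span >= size_needed:
--                 return start_of_span
--         else:
--             current_span = 0
--     return -1
-- ===== SOURCE B (Python) =====
-- def find_leftmost_space(blocks, size_needed):
--     # Run-based two-pointer scan: jump over maximal runs of equal blocks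
--     # instead of updating a per-element span accumulator.
--     i = 0
--     n = len(blocks)
--     while i < n:
--         x = blocks[i]
--         j = i + 1
--         while j < n and blocks[j] == x:
--             j += 1
--         if x == '.' and j - i >= size_needed:
--             return i
--         i = j
--     return -1
-- ===== Notes on version B (the rewrite author's own statement) =====
-- stated objective: alternative
-- what changed: Replaces the per-element span/start accumulator with a run-based two-pointer scan over maximal runs of equal blocks, returning the current position when a '.' run is long enough.
import Mathlib
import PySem

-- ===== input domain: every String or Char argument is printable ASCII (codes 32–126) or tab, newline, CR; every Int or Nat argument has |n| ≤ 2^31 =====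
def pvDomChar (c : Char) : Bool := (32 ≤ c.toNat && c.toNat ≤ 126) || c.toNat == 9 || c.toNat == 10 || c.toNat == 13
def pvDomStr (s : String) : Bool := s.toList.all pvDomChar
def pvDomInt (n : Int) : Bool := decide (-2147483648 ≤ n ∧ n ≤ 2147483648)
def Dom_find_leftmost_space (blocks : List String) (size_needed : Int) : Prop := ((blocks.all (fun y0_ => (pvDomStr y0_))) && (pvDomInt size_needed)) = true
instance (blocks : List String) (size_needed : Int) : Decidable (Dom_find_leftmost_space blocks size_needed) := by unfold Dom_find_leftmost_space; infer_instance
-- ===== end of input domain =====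

-- ===== PORT A =====
-- per-element scan keeping (current_span, start_of_span), early return when span reaches size_needed
def pvAGo (l : List String) (i : Nat) (span : Nat) (start : Nat) (need : Int) : Int :=
  match l with
  | [] => -1
  | b :: rest =>
      if b == "." then
        let start' := if span == 0 then i else start
        let span' := span + 1
        if need ≤ (span' : Int) then (start' : Int)
        else pvAGo rest (i + 1) span' start' need
      else pvAGo rest (i + 1) 0 start need

def find_leftmost_space (blocks : List String) (size_needed : Int) : Int :=
  pvAGo blocks 0 0 0 size_needed

-- ===== PORT B =====
-- run-based two-pointer scan: measure the maximal run at the front, test it, skip it whole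
def pvBGo (rest : List String) (pos : Nat) (need : Int) : Int :=
  match rest with
  | [] => -1
  | x :: xs =>
      let k := 1 + (xs.takeWhile (fun b => b == x)).length
      if x == "." && decide (need ≤ (k : Int)) then (pos : Int)
      else pvBGo (xs.dropWhile (fun b => b == x)) (pos + k) need
termination_by rest.length
decreasing_by
  simp only [List.length_cons]
  exact Nat.lt_succ_of_le (List.length_dropWhile_le _ _)

def find_leftmost_space_alt (blocks : List String) (size_needed : Int) : Int :=
  pvBGo blocks 0 size_needed

-- ===== PRECONDITION & SPEC =====
def Spec_find_leftmost_space (blocks : List String) (size_needed : Int) (out : Int) : Prop := out = find_leftmost_space_alt blocks size_needed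
instance (blocks : List String) (size_needed : Int) (out : Int) : Decidable (Spec_find_leftmost_space blocks size_needed out) := by unfold Spec_find_leftmost_space; infer_instance

-- ===== CLAIM (what is proved, stated in full; the proofs are below) =====
def Claim_equal_find_leftmost_space : Prop := ∀ (blocks : List String) (size_needed : Int), Dom_find_leftmost_space blocks size_needed → Spec_find_leftmost_space blocks size_needed (find_leftmost_space blocks size_needed)

-- ===== LEMMAS AND PROOFS =====

-- unfolding equations for the two loops
theorem pvAGo_nil (i s st : Nat) (need : Int) : pvAGo [] i s st need = -1 := rfl

theorem pvAGo_cons_dot_zero (xs : List String) (i st : Nat) (need : Int) :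
    pvAGo ("." :: xs) i 0 st need =
      if need ≤ (1 : Int) then (i : Int) else pvAGo xs (i + 1) 1 i need := by
  simp [pvAGo]

theorem pvAGo_cons_dot_pos (xs : List String) (i s st : Nat) (need : Int) (hs : ¬ s = 0) :
    pvAGo ("." :: xs) i s st need =
      if need ≤ ((s + 1 : Nat) : Int) then (st : Int) else pvAGo xs (i + 1) (s + 1) st need := by
  simp [pvAGo, hs]

theorem pvAGo_cons_nondot (b : String) (xs : List String) (i s st : Nat) (need : Int)
    (hb : ¬ b = ".") : pvAGo (b :: xs) i s st need = pvAGo xs (i + 1) 0 st need := by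
  simp [pvAGo, hb]

theorem pvBGo_nil (i : Nat) (need : Int) : pvBGo [] i need = -1 := by
  simp [pvBGo]

theorem pvBGo_cons (x : String) (xs : List String) (i : Nat) (need : Int) :
    pvBGo (x :: xs) i need =
      if x == "." && decide (need ≤ ((1 + (xs.takeWhile (fun b => b == x)).length : Nat) : Int))
        then (i : Int)
        else pvBGo (xs.dropWhile (fun b => b == x)) (i + (1 + (xs.takeWhile (fun b => b == x)).length)) need := by
  rw [pvBGo]

-- with span = 0 the recorded start is never consulted before being overwritten
theorem pvAGo_start_irrel (l : List String) : ∀ (i st st' : Nat) (need : Int),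
    pvAGo l i 0 st need = pvAGo l i 0 st' need := by
  induction l with
  | nil => intro i st st' need; rfl
  | cons b rest ih =>
      intro i st st' need
      by_cases hb : b = "."
      · simp [pvAGo, hb]
      · rw [pvAGo_cons_nondot b rest i 0 st need hb, pvAGo_cons_nondot b rest i 0 st' need hb]
        exact ih _ _ _ _

-- a run of non-dot blocks is skipped with span stuck at 0
theorem pvAGo_skip_nondots (run : List String) (h : ∀ b ∈ run, ¬ b = ".") :
    ∀ (rest : List String) (i st : Nat) (need : Int),
    pvAGo (run ++ rest) i 0 st need = pvAGo rest (i + run.length) 0 st need := by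
  induction run with
  | nil => intro rest i st need; simp
  | cons b run' ih =>
      intro rest i st need
      have hb : ¬ b = "." := h b (by simp)
      have h' : ∀ x ∈ run', ¬ x = "." := fun x hx => h x (by simp [hx])
      rw [List.cons_append, pvAGo_cons_nondot b (run' ++ rest) i 0 st need hb, ih h']
      congr 1
      simp; omega

-- through a run of dots the span grows one by one and the start stays fixed
theorem pvAGo_dots (run : List String) (h : ∀ b ∈ run, b = ".") :
    ∀ (rest : List String) (i s st : Nat) (need : Int), 1 ≤ s → (s : Int) < need →
    pvAGo (run ++ rest) i s st need =
      if need ≤ (s : Int) + run.length then (st : Int)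
      else pvAGo rest (i + run.length) (s + run.length) st need := by
  induction run with
  | nil =>
      intro rest i s st need hs hlt
      simp only [List.nil_append, List.length_nil, Nat.cast_zero, add_zero]
      rw [if_neg (by omega)]
  | cons b run' ih =>
      intro rest i s st need hs hlt
      have hb : b = "." := h b (by simp)
      have h' : ∀ x ∈ run', x = "." := fun x hx => h x (by simp [hx])
      have hs0 : ¬ s = 0 := by omega
      rw [List.cons_append, hb, pvAGo_cons_dot_pos (run' ++ rest) i s st need hs0]
      by_cases hc : need ≤ ((s + 1 : Nat) : Int)
      · rw [if_pos hc, if_pos (by simp only [List.length_cons]; push_cast at hc ⊢; omega)]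
      · rw [if_neg hc]
        rw [ih h' rest (i + 1) (s + 1) st need (by omega) (by push_cast at hc ⊢; omega)]
        simp only [List.length_cons]
        by_cases hd : need ≤ ((s + 1 : Nat) : Int) + (run'.length : Int)
        · rw [if_pos hd, if_pos (by push_cast at hd ⊢; omega)]
        · rw [if_neg hd, if_neg (by push_cast at hd ⊢; omega)]
          have e2 : i + 1 + run'.length = i + (run'.length + 1) := by omega
          have e3 : s + 1 + run'.length = s + (run'.length + 1) := by omega
          rw [e2, e3]

-- the head of dropWhile fails the predicate
theorem pvHead_dropWhile (p : String → Bool) (xs : List String) :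
    ∀ (y : String) (ys : List String), xs.dropWhile p = y :: ys → p y = false := by
  induction xs with
  | nil => intro y ys h; simp [List.dropWhile] at h
  | cons a l ih =>
      intro y ys h
      by_cases hp : p a = true
      · rw [List.dropWhile_cons_of_pos hp] at h
        exact ih y ys h
      · rw [List.dropWhile_cons_of_neg hp] at h
        cases h
        simpa using hp

-- main equivalence of the two loops
theorem pvGo_eq : ∀ (n : Nat) (l : List String), l.length ≤ n →
    ∀ (i st : Nat) (need : Int), pvAGo l i 0 st need = pvBGo l i need := by
  intro n
  induction n with
  | zero =>
      intro l hl i st need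
      have : l = [] := List.eq_nil_of_length_eq_zero (Nat.le_zero.mp hl)
      subst this
      rw [pvAGo_nil, pvBGo_nil]
  | succ n ih =>
      intro l hl i st need
      match l with
      | [] => rw [pvAGo_nil, pvBGo_nil]
      | x :: xs =>
        have hxs : xs.length ≤ n := by simp only [List.length_cons] at hl; omega
        set run := xs.takeWhile (fun b => b == x) with hrun
        set rest := xs.dropWhile (fun b => b == x) with hrest
        have hsplit : run ++ rest = xs := List.takeWhile_append_dropWhile
        have hrestlen : rest.length ≤ n :=
          le_trans (List.length_dropWhile_le _ _) hxs
        have hrunmem : ∀ b ∈ run, b = x := by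
          intro b hb
          have := List.mem_takeWhile_imp hb
          simpa using this
        by_cases hx : x = "."
        · -- dot case: A walks the run growing its span; B tests the whole run at once
          subst hx
          have hrundot : ∀ b ∈ run, b = "." := hrunmem
          rw [pvAGo_cons_dot_zero, pvBGo_cons]
          simp only [beq_self_eq_true, Bool.true_and, decide_eq_true_eq]
          by_cases h1 : need ≤ (1 : Int)
          · rw [if_pos h1, if_pos (by push_cast; omega)]
          · rw [if_neg h1]
            conv_lhs => rw [← hsplit]
            rw [pvAGo_dots run hrundot rest (i + 1) 1 i need (le_refl 1) (by omega)]
            simp only [Nat.cast_one]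
            by_cases h2 : need ≤ (1 : Int) + (run.length : Int)
            · rw [if_pos h2, if_pos (by push_cast at h2 ⊢; omega)]
            · rw [if_neg h2, if_neg (by push_cast at h2 ⊢; omega)]
              rcases hh : rest with _ | ⟨y, ys⟩
              · rw [pvAGo_nil, ← hrest, hh, pvBGo_nil]
              · have hy : ¬ y = "." := by
                  have := pvHead_dropWhile (fun b => b == ".") xs y ys (hrest ▸ hh)
                  simpa using this
                rw [pvAGo_cons_nondot y ys (i + 1 + run.length) (1 + run.length) i need hy,
                  pvAGo_start_irrel ys (i + 1 + run.length + 1) i st need]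
                have hIH : pvAGo (y :: ys) (i + (1 + run.length)) 0 st need
                    = pvBGo (y :: ys) (i + (1 + run.length)) need := by
                  apply ih
                  rw [← hh]; exact hrestlen
                rw [pvAGo_cons_nondot y ys (i + (1 + run.length)) 0 st need hy] at hIH
                rw [show i + 1 + run.length + 1 = i + (1 + run.length) + 1 by omega, hIH,
                  ← hrun, ← hrest, hh]
        · -- non-dot case: A resets its span across the run; B skips the run
          have hrunnd : ∀ b ∈ run, ¬ b = "." := fun b hb => by rw [hrunmem b hb]; exact hx
          rw [pvAGo_cons_nondot x xs i 0 st need hx, pvBGo_cons,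
            if_neg (by simp [hx])]
          conv_lhs => rw [← hsplit]
          rw [pvAGo_skip_nondots run hrunnd rest (i + 1) st need,
            show i + 1 + run.length = i + (1 + run.length) by omega]
          exact ih rest hrestlen (i + (1 + run.length)) st need

-- ===== VERDICT (by name: the statement is the Claim_ definition above) =====
theorem find_leftmost_space_spec : Claim_equal_find_leftmost_space := by
  intro blocks size_needed _
  unfold Spec_find_leftmost_space find_leftmost_space find_leftmost_space_alt
  exact pvGo_eq blocks.length blocks (le_refl _) 0 0 size_needed
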